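-- pv_equiv track=rewrite | github.com/jasrusable/state-aggregator | src/main.py | get_all_nested_child_groups
-- ===== SOURCE A (Python) =====
-- def get_all_nested_child_groups(group, child_to_parent_group_mapping):
--     mappings = [{'child': child, 'parent': parent}
--                 for child, parent in child_to_parent_group_mapping.items()]
--     children = []
--
--     def walk(g):
--         filtered_mappings = list(filter(lambda x: x['parent'] == g, mappings))
--         child_groups = [mapping['child'] for mapping in filtered_mappings]
--         if child_groups:
--             children.extend(child_groups)
--             for child in child_groups:
--                 walk(child)
--
--     walk(group)
--     return children
-- ===== SOURCE B (Python) =====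
-- def get_all_nested_child_groups(group, child_to_parent_group_mapping):
--     # Build a parent -> [children] adjacency dict once, then DFS over it,
--     # instead of rescanning the whole mapping at every node.
--     children_of = {}
--     for child, parent in child_to_parent_group_mapping.items():
--         children_of[parent] = children_of.get(parent, []) + [child]
--
--     def collect(g):
--         kids = children_of.get(g, [])
--         result = list(kids)
--         for kid in kids:
--             result.extend(collect(kid))
--         return result
--
--     return collect(group)
-- ===== Notes on version B (the rewrite author's own statement) =====
-- stated objective: alternative
-- what changed: Instead of filtering the whole mapping list at every visited node, B builds a parent-to-children adjacency dict in one pass and then walks the tree via dict lookups, returning lists instead of extending a closure accumulator.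
import Mathlib
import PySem

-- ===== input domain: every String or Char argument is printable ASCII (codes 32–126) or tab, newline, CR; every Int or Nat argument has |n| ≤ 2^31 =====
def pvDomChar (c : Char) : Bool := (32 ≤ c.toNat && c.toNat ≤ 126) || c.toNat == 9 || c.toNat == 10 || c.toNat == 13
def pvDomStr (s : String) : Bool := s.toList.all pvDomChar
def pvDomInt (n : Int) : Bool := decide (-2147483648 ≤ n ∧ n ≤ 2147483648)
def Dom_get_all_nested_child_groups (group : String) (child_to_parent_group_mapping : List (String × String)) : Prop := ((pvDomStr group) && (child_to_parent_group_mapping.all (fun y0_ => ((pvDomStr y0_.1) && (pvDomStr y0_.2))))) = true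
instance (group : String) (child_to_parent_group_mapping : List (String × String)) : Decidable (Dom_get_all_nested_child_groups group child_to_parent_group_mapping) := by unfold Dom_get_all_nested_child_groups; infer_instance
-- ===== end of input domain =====

-- B builds the parent→children adjacency dict once and walks it with dict lookups
-- (objective: alternative), instead of A's full scan of the mapping at every visited node.

-- ===== PORT A =====
-- A's `mappings` list of {'child','parent'} dicts is the items list itself; the closure
-- variable `children` is the threaded accumulator. `walk` recurses along the tree; the
-- fuel (mapping length + 1) bounds the recursion depth, which Pre_ guarantees is enough
-- (any deeper call chain would repeat a child key, i.e. contain a cycle).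
def pvWalkA (mappings : List (String × String)) : Nat → String → List String → List String
  | 0, _, children => children
  | fuel + 1, g, children =>
    let filtered_mappings := mappings.filter (fun x => x.2 == g)
    let child_groups := filtered_mappings.map (fun x => x.1)
    if child_groups ≠ [] then
      child_groups.foldl (fun acc child => pvWalkA mappings fuel child acc)
        (children ++ child_groups)
    else children

def get_all_nested_child_groups (group : String) (child_to_parent_group_mapping : List (String × String)) : List String :=
  pvWalkA child_to_parent_group_mapping (child_to_parent_group_mapping.length + 1) group []

-- ===== PORT B =====
-- `children_of[parent] = children_of.get(parent, []) + [child]` is Dict.modify p.2 [] (· ++ [p.1]).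
def pvBuildAdj (child_to_parent_group_mapping : List (String × String)) : PySem.Dict String (List String) :=
  child_to_parent_group_mapping.foldl (fun d p => d.modify p.2 [] (· ++ [p.1])) PySem.Dict.empty

-- `collect`; same fuel as A's walk (bounds the recursion depth, sufficient under Pre_).
def pvCollectB (adj : PySem.Dict String (List String)) : Nat → String → List String
  | 0, _ => []
  | fuel + 1, g =>
    let kids := adj.getD g []
    kids.foldl (fun result kid => result ++ pvCollectB adj fuel kid) kids

def get_all_nested_child_groups_alt (group : String) (child_to_parent_group_mapping : List (String × String)) : List String :=
  pvCollectB (pvBuildAdj child_to_parent_group_mapping) (child_to_parent_group_mapping.length + 1) group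

-- ===== PRECONDITION & SPEC =====
-- one upward step: the parent of g under first-match (dict) lookup
def pvParentOf (m : List (String × String)) (g : String) : Option String :=
  (m.find? (fun x => x.1 == g)).map (fun x => x.2)

-- g's ancestor k steps up, if defined
def pvAncestor (m : List (String × String)) : Nat → String → Option String
  | 0, g => some g
  | k + 1, g =>
    match pvParentOf m g with
    | none => none
    | some p => pvAncestor m k p

-- Pre_ excludes exactly the inputs on which the Python A does not return: mappings whose
-- child keys are not distinct never arise from a Python dict, and when `group` lies on a
-- parent-cycle A recurses forever (RecursionError).  This is a shape condition on the
-- input graph (no duplicate keys, no cycle through `group`), not a run of the algorithm.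
def Pre_get_all_nested_child_groups (group : String) (child_to_parent_group_mapping : List (String × String)) : Prop :=
  (child_to_parent_group_mapping.map Prod.fst).Nodup ∧
  ∀ k ∈ List.range child_to_parent_group_mapping.length,
    pvAncestor child_to_parent_group_mapping (k + 1) group ≠ some group

instance (group : String) (child_to_parent_group_mapping : List (String × String)) : Decidable (Pre_get_all_nested_child_groups group child_to_parent_group_mapping) := by unfold Pre_get_all_nested_child_groups; infer_instance

def pvWitness_get_all_nested_child_groups : String × (List (String × String)) :=
  ("a", [("b", "a"), ("c", "b"), ("d", "b")])

def Spec_get_all_nested_child_groups (group : String) (child_to_parent_group_mapping : List (String × String)) (out : List String) : Prop := out = get_all_nested_child_groups_alt group child_to_parent_group_mapping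
instance (group : String) (child_to_parent_group_mapping : List (String × String)) (out : List String) : Decidable (Spec_get_all_nested_child_groups group child_to_parent_group_mapping out) := by unfold Spec_get_all_nested_child_groups; infer_instance

-- ===== CLAIM (what is proved, stated in full; the proofs are below) =====
def Claim_equal_get_all_nested_child_groups : Prop := ∀ (group : String) (child_to_parent_group_mapping : List (String × String)), Dom_get_all_nested_child_groups group child_to_parent_group_mapping → Pre_get_all_nested_child_groups group child_to_parent_group_mapping → Spec_get_all_nested_child_groups group child_to_parent_group_mapping (get_all_nested_child_groups group child_to_parent_group_mapping)

-- ===== LEMMAS AND PROOFS =====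

-- the adjacency dict looks up exactly what A's filter-and-project computes
theorem pvAdj_getD (m : List (String × String)) (g : String) (d : PySem.Dict String (List String)) :
    (m.foldl (fun d p => d.modify p.2 [] (· ++ [p.1])) d).getD g []
      = d.getD g [] ++ (m.filter (fun x => x.2 == g)).map (fun x => x.1) := by
  induction m generalizing d with
  | nil => simp
  | cons hd tl ih =>
    simp only [List.foldl_cons, ih, List.filter_cons]
    by_cases h : hd.2 = g
    · simp [h]
    · have : (hd.2 == g) = false := by simp [h]
      simp [this, PySem.Dict.getD_modify, Ne.symm h]

-- A's walk threads its accumulator in front of B's collect, at every fuel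
theorem pvWalkA_eq_collect (m : List (String × String)) (fuel : Nat) :
    ∀ (g : String) (acc : List String),
      pvWalkA m fuel g acc = acc ++ pvCollectB (pvBuildAdj m) fuel g := by
  induction fuel with
  | zero => intro g acc; simp [pvWalkA, pvCollectB]
  | succ fuel ih =>
    intro g acc
    have hkids : (pvBuildAdj m).getD g [] = (m.filter (fun x => x.2 == g)).map (fun x => x.1) := by
      simpa using pvAdj_getD m g PySem.Dict.empty
    simp only [pvWalkA, pvCollectB, hkids]
    set kids := (m.filter (fun x => x.2 == g)).map (fun x => x.1) with hk
    by_cases hnil : kids = []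
    · simp [hnil]
    · simp only [if_pos hnil]
      -- both sides fold over the same kids list
      have main : ∀ (l : List String) (a b : List String),
          l.foldl (fun acc child => pvWalkA m fuel child acc) (a ++ b)
            = a ++ l.foldl (fun result kid => result ++ pvCollectB (pvBuildAdj m) fuel kid) b := by
        intro l
        induction l with
        | nil => intro a b; simp
        | cons x xs ihx =>
          intro a b
          have h1 : pvWalkA m fuel x (a ++ b) = (a ++ b) ++ pvCollectB (pvBuildAdj m) fuel x :=
            ih x (a ++ b)
          simp only [List.foldl_cons, h1, List.append_assoc]
          exact ihx a (b ++ pvCollectB (pvBuildAdj m) fuel x)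
      exact main kids acc kids

-- ===== VERDICT (by name: the statement is the Claim_ definition above) =====
theorem get_all_nested_child_groups_spec : Claim_equal_get_all_nested_child_groups := by
  intro group m _ _
  unfold Spec_get_all_nested_child_groups get_all_nested_child_groups get_all_nested_child_groups_alt
  simpa using pvWalkA_eq_collect m (m.length + 1) group []
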